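-- pv_equiv track=rewrite | github.com/Bleking/baekjoon_algorithm | gold/gold IV/1407.py | f
-- ===== SOURCE A (Python) =====
-- def f(N):
--   if N == 0:
--     return 0
--
--   answer = 0
--   power = 1
--
--   while power <= N:
--     cnt = (N // power) - (N // (power * 2))
--     answer += (cnt * power)
--     power *= 2
--
--   return answer
-- ===== SOURCE B (Python) =====
-- def f(N):
--     # divide and conquer: odd numbers in 1..N contribute 1 each (there are N - N//2),
--     # even numbers 2m contribute twice the lowest set bit of m for m in 1..N//2
--     if N <= 0:
--         return 0
--     return (N - N // 2) + 2 * f(N // 2)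
-- ===== Notes on version B (the rewrite author's own statement) =====
-- stated objective: simpler
-- what changed: Replaces A's bottom-up loop over bit positions (counting multiples per power of two) with a top-down divide-and-conquer recurrence f(N) = (N - N//2) + 2*f(N//2).
import Mathlib
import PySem

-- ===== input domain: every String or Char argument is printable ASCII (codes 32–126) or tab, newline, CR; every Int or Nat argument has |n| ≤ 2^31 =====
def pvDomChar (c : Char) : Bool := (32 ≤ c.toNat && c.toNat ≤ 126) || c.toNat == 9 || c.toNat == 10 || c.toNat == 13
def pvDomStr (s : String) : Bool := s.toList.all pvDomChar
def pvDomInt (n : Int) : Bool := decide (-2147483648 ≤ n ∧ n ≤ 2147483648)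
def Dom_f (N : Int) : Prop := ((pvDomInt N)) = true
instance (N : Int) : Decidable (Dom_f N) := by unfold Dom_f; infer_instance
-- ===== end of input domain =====

-- B replaces A's bottom-up loop over bit positions with a top-down halving recurrence; objective: simpler.


-- ===== PORT A =====
-- the while loop of A: state (answer accumulated as we go), power starts at 1 (always positive)
def fLoop (N power : Int) (hp : 0 < power) : Int :=
  if _h : power ≤ N then
    ((PySem.Int.floordiv N power) - (PySem.Int.floordiv N (power * 2))) * power
      + fLoop N (power * 2) (by omega)
  else 0
termination_by (N + 1 - power).toNat
decreasing_by omega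

def f (N : Int) : Int :=
  if N = 0 then 0
  else fLoop N 1 (by norm_num)

-- ===== PORT B =====
def f_alt (N : Int) : Int :=
  if _h : N ≤ 0 then 0
  else (N - PySem.Int.floordiv N 2) + 2 * f_alt (PySem.Int.floordiv N 2)
termination_by N.toNat
decreasing_by
  have := PySem.Int.floordiv_eq_iff_of_pos (a := N) (b := 2) (q := PySem.Int.floordiv N 2) (by norm_num)
  omega

-- ===== PRECONDITION & SPEC =====
def Spec_f (N : Int) (out : Int) : Prop := out = f_alt N
instance (N : Int) (out : Int) : Decidable (Spec_f N out) := by unfold Spec_f; infer_instance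

-- ===== CLAIM (what is proved, stated in full; the proofs are below) =====
def Claim_equal_f : Prop := ∀ (N : Int), Dom_f N → Spec_f N (f N)

-- ===== LEMMAS AND PROOFS =====

theorem f_alt_of_nonpos {N : Int} (h : N ≤ 0) : f_alt N = 0 := by
  unfold f_alt; simp [h]

theorem fdiv_fdiv (N p : Int) (hp : 0 < p) :
    PySem.Int.floordiv (PySem.Int.floordiv N p) 2 = PySem.Int.floordiv N (p * 2) := by
  have h2p : (0:Int) < p * 2 := by omega
  have hc : PySem.Int.floordiv N (p * 2) * (p * 2) ≤ N ∧
      N < (PySem.Int.floordiv N (p * 2) + 1) * (p * 2) :=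
    (PySem.Int.floordiv_eq_iff_of_pos h2p).mp rfl
  refine (PySem.Int.floordiv_eq_iff_of_pos (by norm_num : (0:Int) < 2)).mpr ⟨?_, ?_⟩
  · refine (PySem.Int.le_floordiv_iff_mul_le hp).mpr ?_
    nlinarith [hc.1]
  · refine (PySem.Int.floordiv_lt_iff_lt_mul hp).mpr ?_
    nlinarith [hc.2]

theorem fLoop_eq (N power : Int) (hp : 0 < power) :
    fLoop N power hp = power * f_alt (PySem.Int.floordiv N power) := by
  refine fLoop.induct N
    (motive := fun p hp => fLoop N p hp = p * f_alt (PySem.Int.floordiv N p))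
    ?_ ?_ power hp
  · intro p hp h ih
    rw [fLoop, dif_pos h]
    have h1 : 1 ≤ PySem.Int.floordiv N p :=
      (PySem.Int.le_floordiv_iff_mul_le hp).mpr (by omega)
    conv_rhs => rw [f_alt]
    rw [dif_neg (by omega : ¬ PySem.Int.floordiv N p ≤ 0)]
    rw [fdiv_fdiv N p hp, ih]
    ring
  · intro p hp h
    rw [fLoop, dif_neg h]
    have h0 : PySem.Int.floordiv N p < 1 :=
      (PySem.Int.floordiv_lt_iff_lt_mul hp).mpr (by omega)
    rw [f_alt_of_nonpos (by omega)]
    ring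

theorem f_spec_aux : ∀ (N : Int), f N = f_alt N := by
  intro N
  unfold f
  split
  · rename_i h; subst h; exact (f_alt_of_nonpos le_rfl).symm
  · rw [fLoop_eq]
    rw [PySem.Int.floordiv_eq_ediv_of_pos (by norm_num), Int.ediv_one, one_mul]

-- ===== VERDICT (by name: the statement is the Claim_ definition above) =====
theorem f_spec : Claim_equal_f := by
  intro N _
  unfold Spec_f
  exact f_spec_aux N
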